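-- pv_equiv track=rewrite | github.com/udonehn/Algorithm | 백준/Gold/6137. 문자열 생성/문자열 생성.py | check
-- ===== SOURCE A (Python) =====
-- def check(arr,l,r):
--     if l>r:
--         return 0
--     if arr[l]<arr[r]:   #왼쪽이 빠른 경우
--         return 0
--     elif arr[l]>arr[r]: #오른쪽이 빠른 경우
--         return 1
--     else:
--         return check(arr,l+1,r-1)
-- ===== SOURCE B (Python) =====
-- def check(arr, l, r):
--     # iterative two-pointer scan instead of recursion
--     while l <= r:
--         a, b = arr[l], arr[r]
--         if a != b:
--             return 1 if a > b else 0
--         l += 1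
--         r -= 1
--     return 0
-- ===== Notes on version B (the rewrite author's own statement) =====
-- stated objective: idiomatic
-- what changed: Replaces the recursion with an iterative two-pointer while-loop that advances l and r in place and decides via a single inequality test.
import Mathlib
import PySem

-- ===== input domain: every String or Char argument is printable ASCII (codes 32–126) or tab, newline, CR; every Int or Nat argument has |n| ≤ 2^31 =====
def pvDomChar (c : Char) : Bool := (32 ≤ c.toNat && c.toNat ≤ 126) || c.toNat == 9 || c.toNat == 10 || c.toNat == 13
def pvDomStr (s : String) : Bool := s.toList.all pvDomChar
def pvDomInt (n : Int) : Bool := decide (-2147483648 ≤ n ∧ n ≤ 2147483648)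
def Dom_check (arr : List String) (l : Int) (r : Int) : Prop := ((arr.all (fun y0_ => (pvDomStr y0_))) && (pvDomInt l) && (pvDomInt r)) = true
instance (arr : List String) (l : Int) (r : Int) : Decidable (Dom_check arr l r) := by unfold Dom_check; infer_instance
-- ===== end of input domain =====

-- B replaces A's recursion by an iterative two-pointer loop; same return value everywhere A returns.

-- ===== PORT A =====
-- literal port of A's recursion; the 'none' branch (Python IndexError) is excluded by Pre_check
def check (arr : List String) (l : Int) (r : Int) : Int :=
  if h : l > r then 0
  else
    match PySem.List.pyGet? arr l, PySem.List.pyGet? arr r with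
    | some a, some b =>
        if a < b then 0
        else if a > b then 1
        else check arr (l + 1) (r - 1)
    | _, _ => 0
termination_by (r - l + 1).toNat
decreasing_by omega

-- ===== PORT B =====
-- port of Source B's while-loop; the 'none' branch (Python IndexError) is excluded by Pre_check
def twoPtrLoop (arr : List String) (l : Int) (r : Int) : Int :=
  if h : l ≤ r then
    match PySem.List.pyGet? arr l with
    | none => 0
    | some a =>
      match PySem.List.pyGet? arr r with
      | none => 0
      | some b =>
        if a ≠ b then (if a > b then 1 else 0)
        else twoPtrLoop arr (l + 1) (r - 1)
  else 0
termination_by (r - l + 1).toNat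
decreasing_by omega

def check_alt (arr : List String) (l : Int) (r : Int) : Int := twoPtrLoop arr l r

-- ===== PRECONDITION & SPEC =====
-- Pre_check = exactly the inputs where Python A returns (otherwise arr[l] or arr[r] raises IndexError)
def Pre_check (arr : List String) (l : Int) (r : Int) : Prop :=
  l > r ∨ (-(arr.length : Int) ≤ l ∧ r < (arr.length : Int))
instance (arr : List String) (l : Int) (r : Int) : Decidable (Pre_check arr l r) := by
  unfold Pre_check; infer_instance

def pvWitness_check : List String × Int × Int := (["ab", "b", "ab"], 0, 2)

def Spec_check (arr : List String) (l : Int) (r : Int) (out : Int) : Prop := out = check_alt arr l r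
instance (arr : List String) (l : Int) (r : Int) (out : Int) : Decidable (Spec_check arr l r out) := by unfold Spec_check; infer_instance

-- ===== CLAIM (what is proved, stated in full; the proofs are below) =====
def Claim_equal_check : Prop := ∀ (arr : List String) (l : Int) (r : Int), Dom_check arr l r → Pre_check arr l r → Spec_check arr l r (check arr l r)

-- ===== LEMMAS AND PROOFS =====

-- the two ports agree on every input (both return 0 on the out-of-range branch)
theorem check_eq_loop (arr : List String) (l r : Int) : check arr l r = twoPtrLoop arr l r := by
  generalize hn : (r - l + 1).toNat = n
  induction n using Nat.strong_induction_on generalizing l r with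
  | _ n ih =>
    rw [check.eq_def, twoPtrLoop.eq_def]
    by_cases h : l > r
    · simp [h, show ¬ l ≤ r by omega]
    · simp only [h, if_false, dif_pos (show l ≤ r by omega)]
      cases ha : PySem.List.pyGet? arr l with
      | none => rfl
      | some a =>
        cases hb : PySem.List.pyGet? arr r with
        | none => rfl
        | some b =>
          rcases lt_trichotomy a b with hab | hab | hab
          · simp [hab, ne_of_lt hab, not_lt_of_gt hab]
          · subst hab
            simp only [lt_irrefl, if_false, if_neg (by simp : ¬ a ≠ a)]
            exact ih (r - 1 - (l + 1) + 1).toNat (by omega) _ _ rfl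
          · simp [hab, (ne_of_lt hab).symm, not_lt_of_gt hab]

-- ===== VERDICT (by name: the statement is the Claim_ definition above) =====
theorem check_spec : Claim_equal_check := by
  intro arr l r _ _
  unfold Spec_check check_alt
  exact check_eq_loop arr l r
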